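-- pv_equiv track=rewrite | github.com/bxt-team/aicos | backend/app/api/routers/ai_agents.py | categorize_agent
-- ===== SOURCE A (Python) =====
-- from typing import List, Dict, Any
--
-- def categorize_agent(agent_id: str, config: Dict[str, Any]) -> str:
--     """Categorize agent based on its ID and configuration."""
--     categories = {
--         'qa': ['qa_agent'],
--         'content': ['affirmations_agent', 'content_workflow_agent'],
--         'visual': ['image_search_agent', 'visual_post_creator_agent', 'post_composition_agent'],
--         'video': ['video_generation_agent', 'background_video_agent', 'voice_over_agent', 'caption_agent'],
--         'instagram': ['instagram_ai_prompt_agent', 'instagram_poster_agent', 'instagram_analyzer_agent', 'write_hashtag_research_agent'],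
--         'threads': ['threads_analyst', 'threads_strategy', 'threads_generator', 'threads_approval', 'threads_scheduler'],
--         'x': ['x_analyst', 'x_strategy', 'x_generator', 'x_approval', 'x_scheduler'],
--         'testing': ['app_testing_agent']
--     }
--
--     for category, agent_list in categories.items():
--         if agent_id in agent_list:
--             return category
--
--     return 'general'
-- ===== SOURCE B (Python) =====
-- from typing import List, Dict, Any
--
-- # Flat (agent_id, category) table, sorted by agent_id, so membership can be
-- # decided by binary search instead of scanning category buckets.
-- _SORTED_TABLE = [
--     ('affirmations_agent', 'content'),
--     ('app_testing_agent', 'testing'),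
--     ('background_video_agent', 'video'),
--     ('caption_agent', 'video'),
--     ('content_workflow_agent', 'content'),
--     ('image_search_agent', 'visual'),
--     ('instagram_ai_prompt_agent', 'instagram'),
--     ('instagram_analyzer_agent', 'instagram'),
--     ('instagram_poster_agent', 'instagram'),
--     ('post_composition_agent', 'visual'),
--     ('qa_agent', 'qa'),
--     ('threads_analyst', 'threads'),
--     ('threads_approval', 'threads'),
--     ('threads_generator', 'threads'),
--     ('threads_scheduler', 'threads'),
--     ('threads_strategy', 'threads'),
--     ('video_generation_agent', 'video'),
--     ('visual_post_creator_agent', 'visual'),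
--     ('voice_over_agent', 'video'),
--     ('write_hashtag_research_agent', 'instagram'),
--     ('x_analyst', 'x'),
--     ('x_approval', 'x'),
--     ('x_generator', 'x'),
--     ('x_scheduler', 'x'),
--     ('x_strategy', 'x'),
-- ]
--
-- def categorize_agent(agent_id: str, config: Dict[str, Any]) -> str:
--     """Categorize agent based on its ID and configuration."""
--     lo, hi = 0, len(_SORTED_TABLE)
--     while lo < hi:
--         mid = (lo + hi) // 2
--         key, cat = _SORTED_TABLE[mid]
--         if agent_id == key:
--             return cat
--         if agent_id < key:
--             hi = mid
--         else:
--             lo = mid + 1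
--     return 'general'
-- ===== Notes on version B (the rewrite author's own statement) =====
-- stated objective: alternative
-- what changed: B replaces A's linear scan over category buckets with membership tests by a binary search over a flat (agent_id, category) table sorted by agent_id, returning 'general' when the search exhausts; correct because all agent ids are distinct.
import Mathlib
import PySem

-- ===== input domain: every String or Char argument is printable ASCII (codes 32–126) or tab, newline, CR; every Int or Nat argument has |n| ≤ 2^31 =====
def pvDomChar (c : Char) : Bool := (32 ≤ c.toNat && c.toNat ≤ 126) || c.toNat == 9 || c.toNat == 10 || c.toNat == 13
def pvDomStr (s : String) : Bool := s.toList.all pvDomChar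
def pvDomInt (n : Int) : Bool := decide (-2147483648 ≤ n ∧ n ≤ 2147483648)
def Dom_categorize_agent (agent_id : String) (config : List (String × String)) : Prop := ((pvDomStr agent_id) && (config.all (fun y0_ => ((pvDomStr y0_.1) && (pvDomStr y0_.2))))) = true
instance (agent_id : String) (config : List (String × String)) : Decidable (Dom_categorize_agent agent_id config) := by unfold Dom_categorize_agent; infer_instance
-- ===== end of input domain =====

-- B replaces A's linear scan over category buckets by binary search in a key-sorted flat table; objective: alternative (config unused by both).

-- ===== PORT A =====
-- the categories dict of A, in insertion order
def pvCategoriesA : List (String × List String) :=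
  [("qa", ["qa_agent"]),
   ("content", ["affirmations_agent", "content_workflow_agent"]),
   ("visual", ["image_search_agent", "visual_post_creator_agent", "post_composition_agent"]),
   ("video", ["video_generation_agent", "background_video_agent", "voice_over_agent", "caption_agent"]),
   ("instagram", ["instagram_ai_prompt_agent", "instagram_poster_agent", "instagram_analyzer_agent", "write_hashtag_research_agent"]),
   ("threads", ["threads_analyst", "threads_strategy", "threads_generator", "threads_approval", "threads_scheduler"]),
   ("x", ["x_analyst", "x_strategy", "x_generator", "x_approval", "x_scheduler"]),
   ("testing", ["app_testing_agent"])]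

-- the for-loop with early return
def pvLoopA (agent_id : String) : List (String × List String) → String
  | [] => "general"
  | (cat, lst) :: rest => if agent_id ∈ lst then cat else pvLoopA agent_id rest

def categorize_agent (agent_id : String) (config : List (String × String)) : String :=
  pvLoopA agent_id pvCategoriesA

-- ===== PORT B =====
-- Source B's _SORTED_TABLE: flat (agent_id, category) pairs sorted by agent_id
def pvSortedTable : List (String × String) :=
  [("affirmations_agent", "content"),
   ("app_testing_agent", "testing"),
   ("background_video_agent", "video"),
   ("caption_agent", "video"),
   ("content_workflow_agent", "content"),
   ("image_search_agent", "visual"),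
   ("instagram_ai_prompt_agent", "instagram"),
   ("instagram_analyzer_agent", "instagram"),
   ("instagram_poster_agent", "instagram"),
   ("post_composition_agent", "visual"),
   ("qa_agent", "qa"),
   ("threads_analyst", "threads"),
   ("threads_approval", "threads"),
   ("threads_generator", "threads"),
   ("threads_scheduler", "threads"),
   ("threads_strategy", "threads"),
   ("video_generation_agent", "video"),
   ("visual_post_creator_agent", "visual"),
   ("voice_over_agent", "video"),
   ("write_hashtag_research_agent", "instagram"),
   ("x_analyst", "x"),
   ("x_approval", "x"),
   ("x_generator", "x"),
   ("x_scheduler", "x"),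
   ("x_strategy", "x")]

-- Source B's while loop, ported with fuel = hi - lo bound (each step shrinks hi - lo, so 25 suffices for the full table)
def pvBsearch (agent_id : String) : Nat → Nat → Nat → String
  | 0, _, _ => "general"
  | fuel + 1, lo, hi =>
    if lo < hi then
      let mid := (lo + hi) / 2
      let p := pvSortedTable.getD mid ("", "")  -- _SORTED_TABLE[mid]; mid always in range, default never used
      if agent_id = p.1 then p.2
      -- Python 'agent_id < key' on str = '<' on toList (code-point lexicographic; PYSEM str COMPARISON)
      else if agent_id.toList < p.1.toList then pvBsearch agent_id fuel lo mid
      else pvBsearch agent_id fuel (mid + 1) hi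
    else "general"

def categorize_agent_alt (agent_id : String) (config : List (String × String)) : String :=
  pvBsearch agent_id pvSortedTable.length 0 pvSortedTable.length

-- ===== PRECONDITION & SPEC =====
def Spec_categorize_agent (agent_id : String) (config : List (String × String)) (out : String) : Prop := out = categorize_agent_alt agent_id config
instance (agent_id : String) (config : List (String × String)) (out : String) : Decidable (Spec_categorize_agent agent_id config out) := by unfold Spec_categorize_agent; infer_instance

-- ===== CLAIM (what is proved, stated in full; the proofs are below) =====
def Claim_equal_categorize_agent : Prop := ∀ (agent_id : String) (config : List (String × String)), Dom_categorize_agent agent_id config → Spec_categorize_agent agent_id config (categorize_agent agent_id config)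

-- ===== LEMMAS AND PROOFS =====
def pvKeys : List String := pvSortedTable.map Prod.fst
theorem pvGetD_mem' (mid : Nat) (h : mid < 25) :
    (pvSortedTable.getD mid ("", "")).1 ∈ pvKeys := by
  interval_cases mid <;> decide

theorem pvBsearch_notMem (a : String) (h : a ∉ pvKeys) :
    ∀ (fuel lo hi : Nat), hi ≤ 25 → pvBsearch a fuel lo hi = "general" := by
  intro fuel
  induction fuel with
  | zero => intro lo hi _; rfl
  | succ n ih =>
    intro lo hi hh
    rw [pvBsearch]
    by_cases hlt : lo < hi
    · rw [if_pos hlt]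
      have hmid : (lo + hi) / 2 < hi := by omega
      by_cases heq : a = (pvSortedTable.getD ((lo + hi) / 2) ("", "")).1
      · exact absurd (heq ▸ pvGetD_mem' _ (lt_of_lt_of_le hmid hh)) h
      · rw [if_neg heq]
        by_cases hlt2 : a.toList < (pvSortedTable.getD ((lo + hi) / 2) ("", "")).1.toList
        · rw [if_pos hlt2]; exact ih lo _ (le_trans (Nat.le_of_lt hmid) hh)
        · rw [if_neg hlt2]; exact ih _ hi hh
    · rw [if_neg hlt]

theorem pvLoopA_notMem (a : String) (h : a ∉ pvKeys) :
    pvLoopA a pvCategoriesA = "general" := by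
  simp only [pvKeys, pvSortedTable, List.map, List.mem_cons, List.not_mem_nil, or_false,
    not_or] at h
  obtain ⟨h1, h2, h3, h4, h5, h6, h7, h8, h9, h10, h11, h12, h13, h14, h15, h16, h17, h18,
    h19, h20, h21, h22, h23, h24, h25⟩ := h
  simp [pvLoopA, pvCategoriesA, h1, h2, h3, h4, h5, h6, h7, h8, h9, h10, h11, h12, h13, h14,
    h15, h16, h17, h18, h19, h20, h21, h22, h23, h24, h25]

-- ===== VERDICT (by name: the statement is the Claim_ definition above) =====
set_option maxHeartbeats 2000000 in
theorem categorize_agent_spec : Claim_equal_categorize_agent := by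
  intro a c _
  show categorize_agent a c = categorize_agent_alt a c
  by_cases h : a ∈ pvKeys
  · simp only [pvKeys, pvSortedTable, List.map, List.mem_cons, List.not_mem_nil, or_false] at h
    rcases h with rfl|rfl|rfl|rfl|rfl|rfl|rfl|rfl|rfl|rfl|rfl|rfl|rfl|rfl|rfl|rfl|rfl|rfl|rfl|rfl|rfl|rfl|rfl|rfl|rfl <;>
      (simp only [categorize_agent, categorize_agent_alt]; decide)
  · rw [categorize_agent, categorize_agent_alt, pvLoopA_notMem a h,
      pvBsearch_notMem a h _ _ _ (by decide)]
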